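-- pv_equiv track=rewrite | github.com/wuyongf/w0405_agent | src/utils/door_sequence_analyzer_rev01.py | merge_rule_rev01
-- ===== SOURCE A (Python) =====
-- def merge_rule_rev01(statuses_info):
--     '''
--     if prev and later are 'FullyClose', 'OperatingUnknown' in beteween, merge
--     '''
--     merged_statuses = []
--     i = 0
--     while i < len(statuses_info):
--         current_status, current_interval = statuses_info[i]
--         # Check if current status is 'OperatingUnknown' and can be merged with 'FullyClose'
--         if current_status == 'OperatingUnknown':
--             can_merge = False
--             if i > 0 and i < len(statuses_info) - 1:
--                 prev_status, _ = statuses_info[i - 1]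
--                 next_status, next_interval = statuses_info[i + 1]
--                 if prev_status == 'FullyClose' and next_status == 'FullyClose':
--                     can_merge = True
--                     # Merge current status interval with the next one
--                     merged_statuses[-1][1][1] = next_interval[1]
--                     i += 1  # Skip the next status as it is merged with the current
--             if not can_merge:
--                 # If cannot merge, add the current status as is
--                 merged_statuses.append([current_status, current_interval])
--         else:
--             merged_statuses.append([current_status, current_interval])
--         i += 1
--     return merged_statuses
-- ===== SOURCE B (Python) =====
-- def merge_rule_rev01(statuses_info):
--     '''Single forward push-then-collapse scan: push each [status, interval] onto a
--     result stack; whenever the top three are FullyClose / OperatingUnknown / FullyClose,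
--     extend the first FullyClose's interval end and pop the other two.
--     Like A, mutates the shared interval list of the merged-into FullyClose in place.'''
--     result = []
--     for status, interval in statuses_info:
--         result.append([status, interval])
--         if (len(result) >= 3 and result[-3][0] == 'FullyClose'
--                 and result[-2][0] == 'OperatingUnknown'
--                 and result[-1][0] == 'FullyClose'):
--             result[-3][1][1] = result[-1][1][1]
--             result.pop()
--             result.pop()
--     return result
-- ===== Notes on version B (the rewrite author's own statement) =====
-- stated objective: alternative
-- what changed: Replaces A's index-driven while loop that looks ahead at statuses_info[i-1]/statuses_info[i+1] and skips indices after a merge with a single push-then-collapse scan that appends each entry to a result stack and collapses whenever the top three are FullyClose/OperatingUnknown/FullyClose.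
import Mathlib
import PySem

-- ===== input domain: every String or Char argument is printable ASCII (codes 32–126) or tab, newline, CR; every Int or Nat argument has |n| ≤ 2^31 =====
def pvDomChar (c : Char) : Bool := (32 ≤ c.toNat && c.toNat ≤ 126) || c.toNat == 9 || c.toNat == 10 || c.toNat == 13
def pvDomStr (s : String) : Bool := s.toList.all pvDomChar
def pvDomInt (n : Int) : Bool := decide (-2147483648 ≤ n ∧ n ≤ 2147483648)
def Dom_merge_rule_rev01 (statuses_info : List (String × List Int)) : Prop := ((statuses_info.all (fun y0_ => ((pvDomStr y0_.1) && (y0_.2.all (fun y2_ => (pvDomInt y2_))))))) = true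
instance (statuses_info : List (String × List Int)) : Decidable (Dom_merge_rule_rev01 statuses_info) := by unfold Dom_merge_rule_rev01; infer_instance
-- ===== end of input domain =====

-- B replaces A's index-skipping look-ahead scan by a push-then-collapse stack scan (look-behind),
-- same cost, simpler control flow. Both Pythons mutate the merged-into interval list of the input
-- in place identically; the equivalence proved here is about the return value.

-- ===== PORT A =====
-- merged_statuses[-1][1][1] = next_interval[1]: Python raises IndexError when merged is empty or
-- the interval has < 2 elements; those inputs are excluded by Pre_, here the operation is a no-op.
def mergeA_setLast (merged : List (String × List Int)) (v : Int) : List (String × List Int) :=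
  match merged.getLast? with
  | none => merged
  | some x => merged.dropLast ++ [(x.1, x.2.set 1 v)]

def mergeA_go (si : List (String × List Int)) (m : List (String × List Int)) (i : Nat) :
    List (String × List Int) :=
  if _h : i < si.length then
    let cur := si.getD i ("", [])
    if cur.1 = "OperatingUnknown" then
      if 0 < i ∧ i < si.length - 1 then
        let prev := si.getD (i - 1) ("", [])
        let nxt := si.getD (i + 1) ("", [])
        if prev.1 = "FullyClose" ∧ nxt.1 = "FullyClose" then
          -- merge: merged[-1][1][1] = next_interval[1]; i += 1 (skip) and the loop's i += 1
          mergeA_go si (mergeA_setLast m (nxt.2.getD 1 0)) (i + 2)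
        else mergeA_go si (m ++ [cur]) (i + 1)
      else mergeA_go si (m ++ [cur]) (i + 1)
    else mergeA_go si (m ++ [cur]) (i + 1)
  else m
termination_by si.length - i
decreasing_by all_goals omega

def merge_rule_rev01 (statuses_info : List (String × List Int)) : List (String × List Int) :=
  mergeA_go statuses_info [] 0

-- ===== PORT B =====
-- push x, then collapse if the top three of the stack are FullyClose/OperatingUnknown/FullyClose
-- (result[-3][1][1] = result[-1][1][1]; two pops). Tail access is transcribed via reverse.
def mergeB_step (res : List (String × List Int)) (x : String × List Int) :
    List (String × List Int) :=
  match (res ++ [x]).reverse with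
  | c :: b :: a :: rest =>
    if a.1 = "FullyClose" ∧ b.1 = "OperatingUnknown" ∧ c.1 = "FullyClose" then
      ((a.1, a.2.set 1 (c.2.getD 1 0)) :: rest).reverse
    else res ++ [x]
  | _ => res ++ [x]

def merge_rule_rev01_alt (statuses_info : List (String × List Int)) : List (String × List Int) :=
  List.foldl mergeB_step [] statuses_info

-- ===== PRECONDITION & SPEC =====
-- Pre_ excludes exactly the inputs on which Python A raises IndexError: a mergeable
-- FullyClose/OperatingUnknown/FullyClose triple one of whose FullyClose intervals has
-- fewer than 2 elements (B raises IndexError on exactly the same inputs).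
def Pre_merge_rule_rev01 (statuses_info : List (String × List Int)) : Prop :=
  ∀ i ∈ List.range statuses_info.length, 0 < i → i + 1 < statuses_info.length →
    (statuses_info.getD i ("", [])).1 = "OperatingUnknown" →
    (statuses_info.getD (i - 1) ("", [])).1 = "FullyClose" →
    (statuses_info.getD (i + 1) ("", [])).1 = "FullyClose" →
    2 ≤ (statuses_info.getD (i - 1) ("", [])).2.length ∧
    2 ≤ (statuses_info.getD (i + 1) ("", [])).2.length
instance (statuses_info : List (String × List Int)) : Decidable (Pre_merge_rule_rev01 statuses_info) := by
  unfold Pre_merge_rule_rev01; infer_instance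

def pvWitness_merge_rule_rev01 : (List (String × List Int)) :=
  [("FullyClose", [0, 1]), ("OperatingUnknown", [1, 2]), ("FullyClose", [2, 3])]

def Spec_merge_rule_rev01 (statuses_info : List (String × List Int)) (out : List (String × List Int)) : Prop := out = merge_rule_rev01_alt statuses_info
instance (statuses_info : List (String × List Int)) (out : List (String × List Int)) : Decidable (Spec_merge_rule_rev01 statuses_info out) := by unfold Spec_merge_rule_rev01; infer_instance

-- ===== CLAIM (what is proved, stated in full; the proofs are below) =====
def Claim_equal_merge_rule_rev01 : Prop := ∀ (statuses_info : List (String × List Int)), Dom_merge_rule_rev01 statuses_info → Pre_merge_rule_rev01 statuses_info → Spec_merge_rule_rev01 statuses_info (merge_rule_rev01 statuses_info)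

-- ===== LEMMAS AND PROOFS =====

-- last elements of two concat decompositions of the same list agree
theorem pv_concat_inj {α : Type} (p q : List α) (a b : α) (h : p ++ [a] = q ++ [b]) :
    p = q ∧ a = b := by
  have := List.append_inj' h (by simp)
  simpa using this

-- pushing never collapses unless the top three match the pattern
theorem mergeB_step_push (res : List (String × List Int)) (x : String × List Int)
    (h : ∀ p a b, res = p ++ [a, b] →
      ¬(a.1 = "FullyClose" ∧ b.1 = "OperatingUnknown" ∧ x.1 = "FullyClose")) :
    mergeB_step res x = res ++ [x] := by
  unfold mergeB_step
  rcases hr : res.reverse with _ | ⟨b, t⟩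
  · simp [hr]
  · rcases t with _ | ⟨a, rest⟩
    · simp [hr]
    · have hres : res = rest.reverse ++ [a, b] := by
        have := congrArg List.reverse hr
        simpa using this
      have hcond := h rest.reverse a b hres
      simp [hr, hcond]

-- the collapsing push
theorem mergeB_step_collapse (p : List (String × List Int)) (a b x : String × List Int)
    (ha : a.1 = "FullyClose") (hb : b.1 = "OperatingUnknown") (hx : x.1 = "FullyClose") :
    mergeB_step (p ++ [a, b]) x = p ++ [(a.1, a.2.set 1 (x.2.getD 1 0))] := by
  unfold mergeB_step
  have hrev : ((p ++ [a, b]) ++ [x]).reverse = x :: b :: a :: p.reverse := by simp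
  simp [ha, hb, hx]

-- main invariant: A's look-ahead loop from position i with accumulator m equals B's
-- push-then-collapse fold over the remaining elements
theorem go_eq (si : List (String × List Int)) :
    ∀ (k i : Nat) (m : List (String × List Int)),
      si.length - i ≤ k →
      (i = 0 → m = []) →
      (0 < i → ∃ p x, m = p ++ [x] ∧ x.1 = (si.getD (i - 1) ("", [])).1) →
      (∀ p a b, m = p ++ [a, b] → a.1 = "FullyClose" → b.1 = "OperatingUnknown" →
        i < si.length → (si.getD i ("", [])).1 ≠ "FullyClose") →
      mergeA_go si m i = List.foldl mergeB_step m (si.drop i) := by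
  intro k
  induction k with
  | zero =>
    intro i m hk _ _ _
    have hlen : si.length ≤ i := by omega
    rw [mergeA_go, List.drop_eq_nil_of_le hlen]
    simp [Nat.not_lt_of_le hlen]
  | succ k ih =>
    intro i m hk h0 htop hq
    by_cases hi : i < si.length
    · have hdrop : si.drop i = si.getD i ("", []) :: si.drop (i + 1) := by
        rw [List.drop_eq_getElem_cons hi, List.getD_eq_getElem _ _ hi]
      rw [mergeA_go]
      simp only [dif_pos hi]
      set cur := si.getD i ("", []) with hcurdef
      by_cases hcur : cur.1 = "OperatingUnknown"
      · by_cases hbnd : 0 < i ∧ i < si.length - 1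
        · set prev := si.getD (i - 1) ("", []) with hprevdef
          set nxt := si.getD (i + 1) ("", []) with hnxtdef
          by_cases hfc : prev.1 = "FullyClose" ∧ nxt.1 = "FullyClose"
          · -- merge case
            simp only [if_pos hcur, if_pos hbnd, if_pos hfc]
            obtain ⟨p, x, hm, hx⟩ := htop hbnd.1
            have hxfc : x.1 = "FullyClose" := by rw [hx]; exact hfc.1
            have hset : mergeA_setLast m (nxt.2.getD 1 0) =
                p ++ [(x.1, x.2.set 1 (nxt.2.getD 1 0))] := by
              rw [hm]; unfold mergeA_setLast
              simp
            have hi1 : i + 1 < si.length := by omega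
            have hdrop1 : si.drop (i + 1) = nxt :: si.drop (i + 2) := by
              rw [List.drop_eq_getElem_cons hi1, hnxtdef, List.getD_eq_getElem _ _ hi1]
            rw [hdrop, hdrop1]
            simp only [List.foldl_cons]
            have hs1 : mergeB_step m cur = m ++ [cur] := by
              apply mergeB_step_push
              intro _ _ _ _ hc
              rw [hcur] at hc
              exact absurd hc.2.2 (by decide)
            have hs2 : mergeB_step (m ++ [cur]) nxt =
                p ++ [(x.1, x.2.set 1 (nxt.2.getD 1 0))] := by
              have : m ++ [cur] = p ++ [x, cur] := by rw [hm]; simp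
              rw [this]
              exact mergeB_step_collapse p x cur nxt hxfc hcur hfc.2
            rw [hs1, hs2, hset]
            apply ih (i + 2)
            · omega
            · omega
            · intro _
              refine ⟨p, _, rfl, ?_⟩
              show x.1 = (si.getD (i + 1) ("", [])).1
              rw [← hnxtdef, hxfc, hfc.2]
            · intro q a b hm' _ hbou _
              have hb := (pv_concat_inj (q ++ [a]) p b (x.1, x.2.set 1 (nxt.2.getD 1 0))
                (by simpa using hm'.symm)).2
              rw [hb] at hbou
              rw [hxfc] at hbou
              exact absurd hbou (by decide)
          · -- OU, bounds ok, but neighbours not both FullyClose: plain append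
            simp only [if_pos hcur, if_pos hbnd, if_neg hfc]
            rw [hdrop]
            simp only [List.foldl_cons]
            have hs1 : mergeB_step m cur = m ++ [cur] := by
              apply mergeB_step_push
              intro _ _ _ _ hc
              rw [hcur] at hc
              exact absurd hc.2.2 (by decide)
            rw [hs1]
            apply ih (i + 1)
            · omega
            · omega
            · intro _
              exact ⟨m, cur, rfl, by simp [hcurdef]⟩
            · intro q a b hm' hafc hbou hi1
              obtain ⟨hqm, hbcur⟩ := pv_concat_inj (q ++ [a]) m b cur (by simpa using hm'.symm)
              have hmne : m = q ++ [a] := hqm.symm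
              have hipos : 0 < i := by
                by_contra hz
                have : m = [] := h0 (by omega)
                rw [this] at hmne
                exact absurd hmne.symm (by simp)
              obtain ⟨p, x, hm2, hx⟩ := htop hipos
              have hax : a = x := (pv_concat_inj q p a x (hmne ▸ hm2)).2
              have hprevfc : prev.1 = "FullyClose" := by
                rw [← hx, ← hax]; exact hafc
              rw [← hnxtdef]
              intro hn
              exact hfc ⟨hprevfc, hn⟩
        · -- OU at the boundary: plain append
          simp only [if_pos hcur, if_neg hbnd]
          rw [hdrop]
          simp only [List.foldl_cons]
          have hs1 : mergeB_step m cur = m ++ [cur] := by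
            apply mergeB_step_push
            intro _ _ _ _ hc
            rw [hcur] at hc
            exact absurd hc.2.2 (by decide)
          rw [hs1]
          apply ih (i + 1)
          · omega
          · omega
          · intro _
            exact ⟨m, cur, rfl, by simp [hcurdef]⟩
          · intro q a b hm' hafc hbou hi1
            obtain ⟨hqm, _⟩ := pv_concat_inj (q ++ [a]) m b cur (by simpa using hm'.symm)
            have hmne : m = q ++ [a] := hqm.symm
            have hipos : 0 < i := by
              by_contra hz
              have : m = [] := h0 (by omega)
              rw [this] at hmne
              exact absurd hmne.symm (by simp)
            exact absurd ⟨hipos, by omega⟩ hbnd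
      · -- not OperatingUnknown: plain append
        simp only [if_neg hcur]
        rw [hdrop]
        simp only [List.foldl_cons]
        have hs1 : mergeB_step m cur = m ++ [cur] := by
          apply mergeB_step_push
          intro p a b hm' hc
          exact hq p a b hm' hc.1 hc.2.1 hi hc.2.2
        rw [hs1]
        apply ih (i + 1)
        · omega
        · omega
        · intro _
          exact ⟨m, cur, rfl, by simp [hcurdef]⟩
        · intro q a b hm' _ hbou _
          have hbcur := (pv_concat_inj (q ++ [a]) m b cur (by simpa using hm'.symm)).2
          rw [hbcur] at hbou
          exact absurd hbou hcur
    · rw [mergeA_go, List.drop_eq_nil_of_le (by omega)]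
      simp [hi]

-- ===== VERDICT (by name: the statement is the Claim_ definition above) =====
theorem merge_rule_rev01_spec : Claim_equal_merge_rule_rev01 := by
  intro si _ _
  unfold Spec_merge_rule_rev01 merge_rule_rev01 merge_rule_rev01_alt
  have := go_eq si si.length 0 [] (by omega) (fun _ => rfl)
    (fun h => absurd h (by omega))
    (fun p a b hm _ _ _ => absurd hm.symm (by simp))
  simpa using this
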